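-- pv_equiv track=rewrite | github.com/omnetpp/cmake | update_launch_json.py | escapeArgs
-- ===== SOURCE A (Python) =====
-- def escapeArgs(args):
--     escaped_args = []
--     escape_next = False
--     for arg in args:
--         if escape_next:
--             escaped_args.append(arg.replace(';', '\\;'))
--             escape_next = False
--         else:
--             escaped_args.append(arg)
--             escape_next = (arg == '-n')
--     return escaped_args
-- ===== SOURCE B (Python) =====
-- def escapeArgs(args):
--     out = []
--     xs = list(args)
--     i = 0
--     n = len(xs)
--     while i < n:
--         if xs[i] == '-n' and i + 1 < n:
--             out.append(xs[i])
--             out.append(xs[i + 1].replace(';', '\\;'))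
--             i += 2
--         else:
--             out.append(xs[i])
--             i += 1
--     return out
-- ===== Notes on version B (the rewrite author's own statement) =====
-- stated objective: alternative
-- what changed: Replaces the boolean escape_next flag carried across a for-loop by an index-based while loop that consumes a '-n' and its following argument as one pair in a single step.
import Mathlib
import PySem

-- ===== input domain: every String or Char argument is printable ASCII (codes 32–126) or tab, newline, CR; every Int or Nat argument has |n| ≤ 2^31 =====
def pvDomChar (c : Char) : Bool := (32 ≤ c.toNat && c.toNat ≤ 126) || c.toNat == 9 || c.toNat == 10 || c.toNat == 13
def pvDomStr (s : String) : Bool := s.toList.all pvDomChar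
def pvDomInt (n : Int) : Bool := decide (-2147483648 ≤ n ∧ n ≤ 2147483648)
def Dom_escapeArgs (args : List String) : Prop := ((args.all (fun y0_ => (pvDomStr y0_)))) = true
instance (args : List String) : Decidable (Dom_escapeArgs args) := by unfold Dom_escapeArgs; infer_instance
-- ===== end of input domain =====

-- B replaces A's escape_next flag carried across the loop by an index-style pass
-- that consumes a '-n' together with its following argument in one step (objective: alternative).

-- ===== PORT A =====
-- literal port of A: fold over args carrying (escaped_args, escape_next)
def escapeArgs (args : List String) : List String :=
  (args.foldl (fun st arg =>
      if st.2 then (st.1 ++ [PySem.Str.replace arg ";" "\\;"], false)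
      else (st.1 ++ [arg], arg == "-n"))
    ([], false)).1

-- ===== PORT B =====
-- port of B's while loop: each step consumes '-n' plus its successor, or one element
def escapeArgsAltLoop : List String → List String
  | [] => []
  | [a] => [a]
  | a :: b :: rest =>
    if a == "-n" then a :: PySem.Str.replace b ";" "\\;" :: escapeArgsAltLoop rest
    else a :: escapeArgsAltLoop (b :: rest)

def escapeArgs_alt (args : List String) : List String := escapeArgsAltLoop args

-- ===== PRECONDITION & SPEC =====
def Spec_escapeArgs (args : List String) (out : List String) : Prop := out = escapeArgs_alt args
instance (args : List String) (out : List String) : Decidable (Spec_escapeArgs args out) := by unfold Spec_escapeArgs; infer_instance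

-- ===== CLAIM (what is proved, stated in full; the proofs are below) =====
def Claim_equal_escapeArgs : Prop := ∀ (args : List String), Dom_escapeArgs args → Spec_escapeArgs args (escapeArgs args)

-- ===== LEMMAS AND PROOFS =====
-- functional reading of A's loop body
def escapeArgsGo : Bool → List String → List String
  | _, [] => []
  | true, a :: rest => PySem.Str.replace a ";" "\\;" :: escapeArgsGo false rest
  | false, a :: rest => a :: escapeArgsGo (a == "-n") rest

theorem escapeArgs_fold_eq (l : List String) : ∀ (acc : List String) (flag : Bool),
    (l.foldl (fun st arg =>
      if st.2 then (st.1 ++ [PySem.Str.replace arg ";" "\\;"], false)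
      else (st.1 ++ [arg], arg == "-n")) (acc, flag)).1 = acc ++ escapeArgsGo flag l := by
  induction l with
  | nil => intro acc flag; simp [escapeArgsGo]
  | cons a rest ih =>
    intro acc flag
    cases flag <;> simp [List.foldl, escapeArgsGo, ih]

theorem escapeArgsGo_eq_alt : ∀ l : List String, escapeArgsGo false l = escapeArgsAltLoop l
  | [] => rfl
  | [a] => by simp [escapeArgsGo, escapeArgsAltLoop]
  | a :: b :: rest => by
    by_cases h : a == "-n"
    · simp [escapeArgsGo, escapeArgsAltLoop, h, escapeArgsGo_eq_alt rest]
    · simp [escapeArgsGo, escapeArgsAltLoop, h, escapeArgsGo_eq_alt (b :: rest)]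

-- ===== VERDICT (by name: the statement is the Claim_ definition above) =====
theorem escapeArgs_spec : Claim_equal_escapeArgs := by
  intro args _
  show escapeArgs args = escapeArgs_alt args
  unfold escapeArgs escapeArgs_alt
  rw [escapeArgs_fold_eq, escapeArgsGo_eq_alt]
  simp
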